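-- pv_equiv track=rewrite | github.com/zronyj/TC3Q | Data/isoelectricp.py | get_charge
-- ===== SOURCE A (Python) =====
-- def get_charge(tabla, switch=0):
-- 	carga = 0
-- 	for i in range(len(tabla)):
-- 		if tabla[i][0] < switch:
-- 			carga += tabla[i][1]
-- 		else:
-- 			carga += tabla[i][1] + 1
-- 	return carga
-- ===== SOURCE B (Python) =====
-- def get_charge(tabla, switch=0):
--     return sum(row[1] for row in tabla) + sum(1 for row in tabla if row[0] >= switch)
-- ===== Notes on version B (the rewrite author's own statement) =====
-- stated objective: simpler
-- what changed: B replaces the per-element branch choosing between v and v+1 by two independent aggregates: the plain sum of the second components plus the count of rows whose first component is >= switch.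
import Mathlib
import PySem

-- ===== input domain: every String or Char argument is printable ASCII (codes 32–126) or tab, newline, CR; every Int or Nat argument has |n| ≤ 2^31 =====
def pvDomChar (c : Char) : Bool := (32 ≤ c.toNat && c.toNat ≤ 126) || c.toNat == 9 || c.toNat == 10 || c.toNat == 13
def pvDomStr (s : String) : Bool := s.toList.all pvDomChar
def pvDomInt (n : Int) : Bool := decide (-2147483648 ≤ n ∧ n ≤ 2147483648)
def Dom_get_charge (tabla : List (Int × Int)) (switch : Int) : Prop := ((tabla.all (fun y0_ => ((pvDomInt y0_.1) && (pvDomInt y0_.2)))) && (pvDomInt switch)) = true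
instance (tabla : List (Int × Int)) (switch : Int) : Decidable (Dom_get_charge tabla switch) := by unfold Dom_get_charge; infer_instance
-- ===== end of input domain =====

-- ===== PORT A =====
-- Literal port of A: loop over range(len(tabla)) indexing tabla[i]; the getD default is a
-- totality guard only (indices are always in range).
def get_charge (tabla : List (Int × Int)) (switch : Int) : Int :=
  (PySem.List.pyRange 0 (tabla.length : Int) 1).foldl
    (fun carga i =>
      let row := PySem.List.pyGetD tabla i ((0 : Int), (0 : Int))
      if row.1 < switch then carga + row.2 else carga + row.2 + 1) 0

-- ===== PORT B =====
-- Port of B: base sum of second components plus count of rows with first component >= switch.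
def get_charge_alt (tabla : List (Int × Int)) (switch : Int) : Int :=
  (tabla.map Prod.snd).sum + ((tabla.countP (fun row => switch ≤ row.1) : Nat) : Int)

-- ===== PRECONDITION & SPEC =====
def Spec_get_charge (tabla : List (Int × Int)) (switch : Int) (out : Int) : Prop := out = get_charge_alt tabla switch
instance (tabla : List (Int × Int)) (switch : Int) (out : Int) : Decidable (Spec_get_charge tabla switch out) := by unfold Spec_get_charge; infer_instance

-- ===== CLAIM (what is proved, stated in full; the proofs are below) =====
def Claim_equal_get_charge : Prop := ∀ (tabla : List (Int × Int)) (switch : Int), Dom_get_charge tabla switch → Spec_get_charge tabla switch (get_charge tabla switch)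

-- ===== LEMMAS AND PROOFS =====

-- Loop invariant: the branching fold equals init + (sum of snds) + (count of rows with fst >= switch).
theorem get_charge_fold_eq (switch : Int) (tabla : List (Int × Int)) : ∀ (init : Int),
    tabla.foldl (fun carga row =>
      if row.1 < switch then carga + row.2 else carga + row.2 + 1) init
    = init + (tabla.map Prod.snd).sum + ((tabla.countP (fun row => switch ≤ row.1) : Nat) : Int) := by
  induction tabla with
  | nil => intro init; simp
  | cons hd tl ih =>
    intro init
    simp only [List.foldl_cons, List.map_cons, List.sum_cons, List.countP_cons, ih]
    by_cases h : hd.1 < switch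
    · have h2 : ¬ (switch ≤ hd.1) := by omega
      simp [h, h2]; ring
    · have h2 : switch ≤ hd.1 := by omega
      simp [h, h2]; ring

-- ===== VERDICT (by name: the statement is the Claim_ definition above) =====
theorem get_charge_spec : Claim_equal_get_charge := by
  intro tabla switch _
  unfold Spec_get_charge get_charge get_charge_alt
  rw [PySem.List.foldl_pyRange_zero_pyGetD' tabla ((0 : Int), (0 : Int))
    (fun carga row => if row.1 < switch then carga + row.2 else carga + row.2 + 1) 0]
  rw [get_charge_fold_eq]
  ring
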